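-- pv_equiv track=rewrite | github.com/thealper2/codewars-solutions | 7-kyu/movie_showtimes.py | movie_times
-- ===== SOURCE A (Python) =====
-- def movie_times(open_hour, close_hour, length):
--     total_minutes_open = (close_hour - open_hour) * 60
--     if total_minutes_open < 0:
--         total_minutes_open += 24 * 60
--
--     current_time = open_hour * 60
--     results = []
--     while current_time + length <= close_hour * 60 or (close_hour < open_hour and current_time + length <= close_hour * 60 + 24 * 60):
--         hour = (current_time // 60) % 24
--         minute = current_time % 60
--         results.append((hour, minute))
--         current_time += length + 15
--
--     return results
-- ===== SOURCE B (Python) =====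
-- def movie_times(open_hour, close_hour, length):
--     limit = close_hour * 60 + (24 * 60 if close_hour < open_hour else 0)
--     start = open_hour * 60
--     if start + length > limit:
--         return []
--     n = (limit - start - length) // (length + 15) + 1
--     return [(((start + i * (length + 15)) // 60) % 24, (start + i * (length + 15)) % 60)
--             for i in range(n)]
-- ===== Notes on version B (the rewrite author's own statement) =====
-- stated objective: simpler
-- what changed: Replaces A's stepping while-loop with a mutable accumulator by a closed-form count of fitting showtimes and an index-driven comprehension generating the times directly.
import Mathlib
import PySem

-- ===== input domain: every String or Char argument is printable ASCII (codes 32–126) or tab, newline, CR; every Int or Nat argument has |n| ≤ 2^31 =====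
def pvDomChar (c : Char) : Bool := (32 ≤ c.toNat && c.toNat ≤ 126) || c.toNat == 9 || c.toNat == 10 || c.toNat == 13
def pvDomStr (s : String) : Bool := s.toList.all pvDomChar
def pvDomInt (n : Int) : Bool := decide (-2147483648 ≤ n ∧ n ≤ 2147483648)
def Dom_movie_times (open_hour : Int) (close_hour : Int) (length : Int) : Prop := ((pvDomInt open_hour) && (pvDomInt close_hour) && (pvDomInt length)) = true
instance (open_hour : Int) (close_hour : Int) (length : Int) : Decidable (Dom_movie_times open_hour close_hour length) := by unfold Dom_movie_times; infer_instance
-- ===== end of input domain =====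

-- B replaces A's stepping while-loop and mutable accumulator by a closed-form count of
-- showtimes plus an index-driven comprehension (objective: simpler).

-- ===== PORT A =====
-- A's while-loop condition, literally
def movieCond (open_hour close_hour length ct : Int) : Bool :=
  (ct + length ≤ close_hour * 60) ||
    (close_hour < open_hour && ct + length ≤ close_hour * 60 + 24 * 60)

-- the effective upper bound A's disjunctive condition amounts to (used for termination)
def movieLimit (open_hour close_hour : Int) : Int :=
  close_hour * 60 + (if close_hour < open_hour then 24 * 60 else 0)

theorem movieCond_iff (open_hour close_hour length ct : Int) :
    movieCond open_hour close_hour length ct = true ↔ ct + length ≤ movieLimit open_hour close_hour := by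
  simp only [movieCond, movieLimit, Bool.or_eq_true, Bool.and_eq_true, decide_eq_true_eq]
  split_ifs with h <;> constructor <;> intro hc <;> omega

-- A's while loop; the 'length + 15 ≤ 0' guard only makes the recursion total
-- (Python A diverges there; such inputs are excluded by Pre_movie_times)
def movieLoop (open_hour close_hour length ct : Int) : List (Int × Int) :=
  if movieCond open_hour close_hour length ct then
    if 0 < length + 15 then
      (PySem.Int.mod (PySem.Int.floordiv ct 60) 24, PySem.Int.mod ct 60) ::
        movieLoop open_hour close_hour length (ct + (length + 15))
    else []
  else []
termination_by (movieLimit open_hour close_hour - ct - length + 1).toNat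
decreasing_by
  rename_i hcond hstep
  rw [movieCond_iff] at hcond
  omega

def movie_times (open_hour : Int) (close_hour : Int) (length : Int) : List (Int × Int) :=
  let total_minutes_open := (close_hour - open_hour) * 60
  let _total_minutes_open :=
    if total_minutes_open < 0 then total_minutes_open + 24 * 60 else total_minutes_open
  movieLoop open_hour close_hour length (open_hour * 60)

-- ===== PORT B =====
def movie_times_alt (open_hour : Int) (close_hour : Int) (length : Int) : List (Int × Int) :=
  let limit := close_hour * 60 + (if close_hour < open_hour then 24 * 60 else 0)
  let start := open_hour * 60
  if start + length > limit then []
  else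
    let n := PySem.Int.floordiv (limit - start - length) (length + 15) + 1
    (PySem.List.pyRange 0 n 1).map fun i =>
      (PySem.Int.mod (PySem.Int.floordiv (start + i * (length + 15)) 60) 24,
       PySem.Int.mod (start + i * (length + 15)) 60)

-- ===== PRECONDITION & SPEC =====
-- Pre_ excludes exactly the inputs on which A's while-loop never terminates:
-- step length+15 ≤ 0 while the loop condition holds at the start.
def Pre_movie_times (open_hour : Int) (close_hour : Int) (length : Int) : Prop :=
  0 < length + 15 ∨
    ¬ (open_hour * 60 + length ≤ close_hour * 60 + (if close_hour < open_hour then 24 * 60 else 0))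

instance (open_hour : Int) (close_hour : Int) (length : Int) : Decidable (Pre_movie_times open_hour close_hour length) := by
  unfold Pre_movie_times; infer_instance

def pvWitness_movie_times : Int × Int × Int := (8, 22, 120)

def Spec_movie_times (open_hour : Int) (close_hour : Int) (length : Int) (out : List (Int × Int)) : Prop := out = movie_times_alt open_hour close_hour length
instance (open_hour : Int) (close_hour : Int) (length : Int) (out : List (Int × Int)) : Decidable (Spec_movie_times open_hour close_hour length out) := by unfold Spec_movie_times; infer_instance

-- ===== CLAIM (what is proved, stated in full; the proofs are below) =====
def Claim_equal_movie_times : Prop := ∀ (open_hour : Int) (close_hour : Int) (length : Int), Dom_movie_times open_hour close_hour length → Pre_movie_times open_hour close_hour length → Spec_movie_times open_hour close_hour length (movie_times open_hour close_hour length)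

-- ===== LEMMAS AND PROOFS =====

-- the per-showtime output, shared shape of both ports
def movieOut (t : Int) : Int × Int :=
  (PySem.Int.mod (PySem.Int.floordiv t 60) 24, PySem.Int.mod t 60)

-- closed-form count of remaining showtimes from time ct
def movieCount (L len step ct : Int) : Nat :=
  if ct + len ≤ L then ((L - ct - len) / step + 1).toNat else 0

theorem movieCount_succ (L len step ct : Int) (hs : 0 < step)
    (hc : ct + len ≤ L) :
    movieCount L len step ct = movieCount L len step (ct + step) + 1 := by
  unfold movieCount
  have hx : 0 ≤ L - ct - len := by omega
  have hd0 : 0 ≤ (L - ct - len) / step := Int.ediv_nonneg hx (le_of_lt hs)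
  by_cases h2 : ct + step + len ≤ L
  · have hsub : (L - (ct + step) - len) / step = (L - ct - len) / step - 1 := by
      have := Int.add_mul_ediv_right (L - ct - len) (-1) (by omega : step ≠ 0)
      have he : L - (ct + step) - len = L - ct - len + (-1) * step := by ring
      rw [he, this]; ring
    have hd0' : 0 ≤ (L - (ct + step) - len) / step :=
      Int.ediv_nonneg (by omega) (le_of_lt hs)
    simp only [if_pos hc, if_pos h2]
    omega
  · have hlt : L - ct - len < step := by omega
    have : (L - ct - len) / step = 0 := Int.ediv_eq_zero_of_lt hx hlt
    simp only [if_pos hc, if_neg h2, this]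
    omega

theorem movieLoop_eq (open_hour close_hour length : Int) (hs : 0 < length + 15) :
    ∀ (n : Nat) (ct : Int),
      (movieLimit open_hour close_hour - ct - length).toNat = n →
      movieLoop open_hour close_hour length ct =
        (List.range (movieCount (movieLimit open_hour close_hour) length (length + 15) ct)).map
          (fun (i : Nat) => movieOut (ct + (i : Int) * (length + 15))) := by
  intro n
  induction n using Nat.strong_induction_on with
  | _ n ih =>
    intro ct hn
    rw [movieLoop.eq_def]
    by_cases hc : movieCond open_hour close_hour length ct = true
    · have hcl := (movieCond_iff open_hour close_hour length ct).mp hc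
      rw [if_pos hc, if_pos hs,
        movieCount_succ _ _ _ _ hs hcl,
        List.range_succ_eq_map]
      have htail : movieLoop open_hour close_hour length (ct + (length + 15)) =
          (List.range
            (movieCount (movieLimit open_hour close_hour) length (length + 15) (ct + (length + 15)))).map
            (fun (i : Nat) => movieOut (ct + (length + 15) + (i : Int) * (length + 15))) := by
        by_cases h2 : ct + (length + 15) + length ≤ movieLimit open_hour close_hour
        · exact ih _ (by omega) _ rfl
        · rw [movieLoop.eq_def, if_neg (by rw [movieCond_iff]; omega)]
          unfold movieCount
          rw [if_neg h2]
          simp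
      rw [htail]
      simp only [List.map_cons, List.map_map]
      congr 1
      · unfold movieOut; norm_num
      · apply List.map_congr_left
        intro i _
        simp only [Function.comp]
        congr 1
        push_cast
        ring
    · have hcl := (movieCond_iff open_hour close_hour length ct).not.mp hc
      rw [if_neg hc]
      unfold movieCount
      rw [if_neg (by omega)]
      simp

-- ===== VERDICT (by name: the statement is the Claim_ definition above) =====
theorem movie_times_spec : Claim_equal_movie_times := by
  intro open_hour close_hour length _ hpre
  unfold Spec_movie_times movie_times movie_times_alt
  dsimp only
  set L := close_hour * 60 + (if close_hour < open_hour then 24 * 60 else 0) with hL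
  have hLlim : movieLimit open_hour close_hour = L := rfl
  by_cases h0 : open_hour * 60 + length > L
  · rw [if_pos h0, movieLoop.eq_def, if_neg (by rw [movieCond_iff, hLlim]; omega)]
  · rw [if_neg h0]
    have hs : 0 < length + 15 := by
      unfold Pre_movie_times at hpre
      rcases hpre with h | h
      · exact h
      · exact absurd (by omega) h
    rw [movieLoop_eq open_hour close_hour length hs _ (open_hour * 60) rfl, hLlim]
    unfold movieCount
    rw [if_pos (by omega),
      show PySem.Int.floordiv (L - open_hour * 60 - length) (length + 15)
          = (L - open_hour * 60 - length) / (length + 15) from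
        PySem.Int.floordiv_eq_ediv_of_pos hs,
      PySem.List.pyRange_one]
    simp only [List.map_map, Int.sub_zero]
    apply List.map_congr_left
    intro i _
    simp only [Function.comp]
    unfold movieOut
    norm_num
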